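-- pv_equiv track=rewrite | github.com/MrBrantCode/unitest_baseline | mut_generate/mist_train_taco/taco_12362/solution.py | min_reversals_to_like_array
-- ===== SOURCE A (Python) =====
-- def min_reversals_to_like_array(N, A):
--     if N == 1:
--         return 0
--
--     look = [0] * (max(A) + 1)
--     look_count = [0] * (max(A) + 1)
--
--     for i in range(N):
--         look_count[A[i]] += 1
--
--     for i in range(N - 1):
--         if A[i] == A[i + 1]:
--             look[A[i]] += 1
--
--     mx = max(look)
--
--     if max(look_count) > (N + 1) / 2:
--         return -1
--     else:
--         return max(mx, (sum(look) + 1) // 2)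
-- ===== SOURCE B (Python) =====
-- def min_reversals_to_like_array(N, A):
--     # One grouped pass over the first N elements (maximal runs of equal values)
--     # feeding per-value frequency/adjacency dicts, instead of A's two
--     # value-indexed arrays of size max(A)+1 filled by two separate index loops.
--     if N == 1:
--         return 0
--     freq = {}
--     adj = {}
--     run_val = 0   # placeholder; only read while run_len > 0
--     run_len = 0
--     for i in range(N):
--         v = A[i]
--         if run_len and v == run_val:
--             run_len += 1
--         else:
--             if run_len:
--                 freq[run_val] = freq.get(run_val, 0) + run_len
--                 adj[run_val] = adj.get(run_val, 0) + (run_len - 1)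
--             run_val = v
--             run_len = 1
--     if run_len:
--         freq[run_val] = freq.get(run_val, 0) + run_len
--         adj[run_val] = adj.get(run_val, 0) + (run_len - 1)
--     if 2 * max(freq.values(), default=0) > N + 1:
--         return -1
--     return max(max(adj.values(), default=0), (sum(adj.values()) + 1) // 2)
-- ===== Notes on version B (the rewrite author's own statement) =====
-- stated objective: alternative
-- what changed: Replaces A's two value-indexed arrays of size max(A)+1 (filled by two separate index loops over range(N) and range(N-1)) with one grouped pass over the first N elements that tracks maximal runs of equal values and accumulates per-value frequency and adjacency dictionaries.
-- outside the precondition, e.g. on min_reversals_to_like_array(2, [2, -1]): A returns -1, B returns 0; on min_reversals_to_like_array(3, [5, -1, 5]): A returns -1, B returns 0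
import Mathlib
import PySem

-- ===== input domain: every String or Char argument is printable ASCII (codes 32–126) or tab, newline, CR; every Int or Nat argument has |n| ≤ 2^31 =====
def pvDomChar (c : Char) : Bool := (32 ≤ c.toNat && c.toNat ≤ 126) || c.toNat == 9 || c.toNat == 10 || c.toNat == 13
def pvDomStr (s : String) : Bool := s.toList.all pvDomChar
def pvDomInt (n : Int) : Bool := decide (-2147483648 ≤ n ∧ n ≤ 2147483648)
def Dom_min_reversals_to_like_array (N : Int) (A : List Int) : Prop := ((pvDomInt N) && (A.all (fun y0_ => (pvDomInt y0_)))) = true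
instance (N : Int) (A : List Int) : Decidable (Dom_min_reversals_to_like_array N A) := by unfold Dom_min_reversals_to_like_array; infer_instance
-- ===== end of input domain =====

-- B replaces A's two value-indexed arrays (filled by two index loops) with one grouped
-- run pass over the first N elements feeding per-value dictionaries (objective: alternative).

-- ===== PORT A =====
-- Python A's float test 'max(look_count) > (N+1)/2' is exact for ints in Dom (division by
-- 2 of an int |·| ≤ 2^31+1 is exact in binary floating point); ported as 2*maxc > N+1.
def min_reversals_to_like_array (N : Int) (A : List Int) : Int :=
  if N == 1 then 0
  else
    let M := (PySem.List.max? A (fun x => x)).getD 0          -- max(A); none unreachable under Pre_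
    let look0 := PySem.List.pyRepeat [(0 : Int)] (M + 1)      -- [0] * (max(A) + 1)
    let look_count0 := PySem.List.pyRepeat [(0 : Int)] (M + 1)
    let look_count := (PySem.List.pyRange 0 N 1).foldl
      (fun lc i => PySem.List.pySetD lc (PySem.List.pyGetD A i 0)
        (PySem.List.pyGetD lc (PySem.List.pyGetD A i 0) 0 + 1)) look_count0
    let look := (PySem.List.pyRange 0 (N - 1) 1).foldl
      (fun lk i => if PySem.List.pyGetD A i 0 == PySem.List.pyGetD A (i + 1) 0 then
          PySem.List.pySetD lk (PySem.List.pyGetD A i 0)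
            (PySem.List.pyGetD lk (PySem.List.pyGetD A i 0) 0 + 1)
        else lk) look0
    let mx := (PySem.List.max? look (fun x => x)).getD 0
    if 2 * (PySem.List.max? look_count (fun x => x)).getD 0 > N + 1 then -1
    else max mx (PySem.Int.floordiv (look.sum + 1) 2)

-- ===== PORT B =====
-- state (freq, adj, run_val, run_len) of B's single grouped pass
def bStep (s : PySem.Dict Int Int × PySem.Dict Int Int × Int × Int) (v : Int) :
    PySem.Dict Int Int × PySem.Dict Int Int × Int × Int :=
  if s.2.2.2 != 0 && v == s.2.2.1 then (s.1, s.2.1, s.2.2.1, s.2.2.2 + 1)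
  else if s.2.2.2 != 0 then
    (s.1.insert s.2.2.1 (s.1.getD s.2.2.1 0 + s.2.2.2),
     s.2.1.insert s.2.2.1 (s.2.1.getD s.2.2.1 0 + (s.2.2.2 - 1)), v, 1)
  else (s.1, s.2.1, v, 1)

-- the trailing 'if run_len:' flush after the loop
def bFlush (s : PySem.Dict Int Int × PySem.Dict Int Int × Int × Int) :
    PySem.Dict Int Int × PySem.Dict Int Int :=
  if s.2.2.2 != 0 then
    (s.1.insert s.2.2.1 (s.1.getD s.2.2.1 0 + s.2.2.2),
     s.2.1.insert s.2.2.1 (s.2.1.getD s.2.2.1 0 + (s.2.2.2 - 1)))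
  else (s.1, s.2.1)

-- 'max(vals, default=0)' is ported as (PySem.List.max? vals id).getD 0
def min_reversals_to_like_array_alt (N : Int) (A : List Int) : Int :=
  if N == 1 then 0
  else
    let fd := bFlush ((PySem.List.pyRange 0 N 1).foldl
      (fun st i => bStep st (PySem.List.pyGetD A i 0))
      (PySem.Dict.empty, PySem.Dict.empty, 0, 0))
    if 2 * (PySem.List.max? fd.1.values (fun x => x)).getD 0 > N + 1 then -1
    else max ((PySem.List.max? fd.2.values (fun x => x)).getD 0)
             (PySem.Int.floordiv (fd.2.values.sum + 1) 2)

-- ===== PRECONDITION & SPEC =====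
-- Pre_ excludes inputs on which A raises (N > len(A), or an all-negative/empty A with
-- N != 1, or a first-N element below -(max(A)+1)) and, as a stated narrowing to the natural
-- domain of value-indexed tables, inputs whose first N elements contain a negative value,
-- where A's returned counts are an artefact of Python negative-index wraparound.
def Pre_min_reversals_to_like_array (N : Int) (A : List Int) : Prop :=
  N = 1 ∨ (N ≤ (A.length : Int) ∧ (∃ x ∈ A, 0 ≤ x) ∧ ∀ x ∈ A.take N.toNat, 0 ≤ x)
instance (N : Int) (A : List Int) : Decidable (Pre_min_reversals_to_like_array N A) := by
  unfold Pre_min_reversals_to_like_array; infer_instance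

def pvWitness_min_reversals_to_like_array : Int × List Int := (3, [1, 2, 1])

def Spec_min_reversals_to_like_array (N : Int) (A : List Int) (out : Int) : Prop := out = min_reversals_to_like_array_alt N A
instance (N : Int) (A : List Int) (out : Int) : Decidable (Spec_min_reversals_to_like_array N A out) := by unfold Spec_min_reversals_to_like_array; infer_instance

-- ===== CLAIM (what is proved, stated in full; the proofs are below) =====
def Claim_equal_min_reversals_to_like_array : Prop := ∀ (N : Int) (A : List Int), Dom_min_reversals_to_like_array N A → Pre_min_reversals_to_like_array N A → Spec_min_reversals_to_like_array N A (min_reversals_to_like_array N A)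

-- ===== LEMMAS AND PROOFS =====

def pairsList : List Int → List Int
  | x :: y :: t => (if x = y then [x] else []) ++ pairsList (y :: t)
  | _ => []

lemma mem_pairsList {x : Int} {l : List Int} (h : x ∈ pairsList l) : x ∈ l := by
  induction l using pairsList.induct with
  | case1 a y t ih =>
    simp only [pairsList, List.mem_append] at h
    rcases h with h | h
    · split at h <;> simp_all
    · have := ih h; simp_all
  | case2 l h2 => cases l with
    | nil => simp [pairsList] at h
    | cons a t => cases t with
      | nil => simp [pairsList] at h
      | cons b u => exact absurd rfl (h2 a b u)

lemma zip_filter_eq_pairsList (l : List Int) :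
    ((l.zip l.tail).filter (fun p => p.1 == p.2)).map (·.1) = pairsList l := by
  induction l using pairsList.induct with
  | case1 a y t ih =>
    simp only [List.tail_cons, List.zip_cons_cons, List.filter_cons, pairsList]
    by_cases h : a = y
    · simp [h] at ih ⊢; exact ih
    · simp [h] at ih ⊢; exact ih
  | case2 l h2 => cases l with
    | nil => simp [pairsList]
    | cons a t => cases t with
      | nil => simp [pairsList]
      | cons b u => exact absurd rfl (h2 a b u)

lemma max_getD_eq (xs ys : List Int) (hxs : xs ≠ []) (hys : ys ≠ [])
    (h1 : ∀ x ∈ xs, ∃ y ∈ ys, x ≤ y) (h2 : ∀ y ∈ ys, ∃ x ∈ xs, y ≤ x) :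
    (PySem.List.max? xs (fun x => x)).getD 0 = (PySem.List.max? ys (fun x => x)).getD 0 := by
  obtain ⟨mx, hmx⟩ : ∃ m, PySem.List.max? xs (fun x => x) = some m := by
    cases h : PySem.List.max? xs (fun x => x) with
    | none => exact absurd ((PySem.List.max?_eq_none_iff xs _).1 h) hxs
    | some m => exact ⟨m, rfl⟩
  obtain ⟨my, hmy⟩ : ∃ m, PySem.List.max? ys (fun x => x) = some m := by
    cases h : PySem.List.max? ys (fun x => x) with
    | none => exact absurd ((PySem.List.max?_eq_none_iff ys _).1 h) hys
    | some m => exact ⟨m, rfl⟩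
  rw [hmx, hmy]
  simp only [Option.getD_some]
  obtain ⟨y, hy, hxy⟩ := h1 mx (PySem.List.max?_mem hmx)
  obtain ⟨x, hx, hyx⟩ := h2 my (PySem.List.max?_mem hmy)
  exact le_antisymm (hxy.trans (PySem.List.max?_isMax hmy y hy))
    (hyx.trans (PySem.List.max?_isMax hmx x hx))

lemma count_add_filter_length (P : List Int) (v : Int) :
    P.count v + (P.filter (· ≠ v)).length = P.length := by
  induction P with
  | nil => simp
  | cons a t iht =>
    simp only [ne_eq, decide_not] at iht ⊢
    by_cases hav : a = v <;>
      simp [hav, List.count_cons, List.filter_cons] <;> omega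

lemma sum_count_int (P : List Int) (S : List Int) (hnd : S.Nodup)
    (hsub : ∀ x ∈ P, x ∈ S) :
    (S.map (fun v => (P.count v : Int))).sum = (P.length : Int) := by
  induction S generalizing P with
  | nil =>
    have : P = [] := List.eq_nil_iff_forall_not_mem.2 (fun x hx => by simpa using hsub x hx)
    simp [this]
  | cons v S' ih =>
    have hv : v ∉ S' := (List.nodup_cons.1 hnd).1
    have key : ∀ w ∈ S', (P.count w : Int) = ((P.filter (· ≠ v)).count w : Int) := by
      intro w hw
      have hwv : w ≠ v := fun h => hv (h ▸ hw)
      rw [List.count_filter]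
      simp [hwv]
    have hsub' : ∀ x ∈ P.filter (· ≠ v), x ∈ S' := by
      intro x hx
      obtain ⟨hxP, hxv⟩ := List.mem_filter.1 hx
      rcases List.mem_cons.1 (hsub x hxP) with h | h
      · exact absurd h (by simpa using hxv)
      · exact h
    rw [List.map_cons, List.sum_cons, List.map_congr_left key,
      ih (P.filter (· ≠ v)) (List.nodup_cons.1 hnd).2 hsub']
    have := count_add_filter_length P v
    omega

lemma foldl_range_adj_nat {γ : Type} (l : List Int) (g : γ → Int → Int → γ) (init : γ) :
    (List.range (l.length - 1)).foldl (fun acc k => g acc (l.getD k 0) (l.getD (k + 1) 0)) init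
      = (l.zip l.tail).foldl (fun acc p => g acc p.1 p.2) init := by
  induction l generalizing init with
  | nil => simp
  | cons x t ih =>
    cases t with
    | nil => simp
    | cons y t' =>
      have hlen : (x :: y :: t').length - 1 = t'.length + 1 := by simp
      rw [hlen, List.range_succ_eq_map, List.foldl_cons, List.foldl_map]
      have hbody : ∀ (acc : γ), ∀ k ∈ List.range t'.length,
          g acc ((x :: y :: t').getD (k + 1) 0) ((x :: y :: t').getD (k + 1 + 1) 0)
            = g acc ((y :: t').getD k 0) ((y :: t').getD (k + 1) 0) := by
        intro acc k _; rfl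
      rw [PySem.List.foldl_congr_mem _ _ _ _ hbody]
      have := ih (g init x y)
      simp only [List.length_cons, Nat.add_sub_cancel] at this
      simpa using this

lemma map_getD_range_self (b : List Int) :
    (List.range b.length).map (fun j => b.getD j 0) = b := by
  apply List.ext_getElem
  · simp
  · intro i h1 h2
    simp [List.getD_eq_getElem?_getD, List.getElem?_eq_getElem h2]

lemma incFold_eq (P : List Int) (b : List Int)
    (h : ∀ v ∈ P, 0 ≤ v ∧ v < (b.length : Int)) :
    P.foldl (fun lc v => PySem.List.pySetD lc v (PySem.List.pyGetD lc v 0 + 1)) b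
      = (List.range b.length).map (fun j => b.getD j 0 + (P.count (j : Int) : Int)) := by
  induction P generalizing b with
  | nil => simpa using (map_getD_range_self b).symm
  | cons v t ih =>
    obtain ⟨hv0, hvlt⟩ := h v List.mem_cons_self
    have hvn : v.toNat < b.length := by omega
    rw [List.foldl_cons, PySem.List.pySetD_of_nonneg b _ hv0,
      PySem.List.pyGetD_of_nonneg b _ hv0,
      ih _ (by intro w hw; simpa using h w (List.mem_cons_of_mem v hw))]
    rw [List.length_set]
    apply List.map_congr_left
    intro j hj
    have hjlt : j < b.length := List.mem_range.1 hj
    by_cases hjv : j = v.toNat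
    · have hbeq : ((j : Int) == v) = true := by simp only [beq_iff_eq]; omega
      simp [List.getD_eq_getElem?_getD, List.getElem?_set, hjlt, hvn, hjv, List.count_cons, hbeq,
        Int.toNat_of_nonneg hv0, hv0]
      push_cast
      ring
    · have hbeq : ((j : Int) == v) = false := by
        simp only [beq_eq_false_iff_ne, ne_eq]; omega
      simp [List.getD_eq_getElem?_getD, List.getElem?_set, hjlt, hvn, hjv, List.count_cons, hbeq,
        Ne.symm hjv, Int.toNat_of_nonneg hv0, hv0]
      omega

def outcome (cvals avals : List Int) (N : Int) : Int :=
  if 2 * (PySem.List.max? cvals (fun x => x)).getD 0 > N + 1 then -1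
  else max ((PySem.List.max? avals (fun x => x)).getD 0)
           (PySem.Int.floordiv (avals.sum + 1) 2)

lemma outcome_congr (cv cv' av av' : List Int) (N : Int)
    (h1 : (PySem.List.max? cv (fun x => x)).getD 0 = (PySem.List.max? cv' (fun x => x)).getD 0)
    (h2 : (PySem.List.max? av (fun x => x)).getD 0 = (PySem.List.max? av' (fun x => x)).getD 0)
    (h3 : av.sum = av'.sum) : outcome cv av N = outcome cv' av' N := by
  unfold outcome; rw [h1, h2, h3]

lemma bfold_freq_getD (t : List Int) (f a : PySem.Dict Int Int) (rv rl c : Int)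
    (hrl : 1 ≤ rl) :
    (bFlush (t.foldl bStep (f, a, rv, rl))).1.getD c 0
      = f.getD c 0 + (if c = rv then rl else 0) + (t.count c : Int) := by
  induction t generalizing f a rv rl with
  | nil =>
    rw [List.foldl_nil, show bFlush (f, a, rv, rl)
        = (f.insert rv (f.getD rv 0 + rl), a.insert rv (a.getD rv 0 + (rl - 1))) by
      simp [bFlush]; omega]
    by_cases hc : c = rv <;> simp [PySem.Dict.getD_insert, hc]
  | cons v t ih =>
    rw [List.foldl_cons]
    by_cases hv : v = rv
    · rw [show bStep (f, a, rv, rl) v = (f, a, rv, rl + 1) by simp [bStep, hv]; omega,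
        ih _ _ _ _ (by omega)]
      subst hv
      by_cases hc : c = v <;> simp [List.count_cons, hc] <;> omega
    · rw [show bStep (f, a, rv, rl) v
          = (f.insert rv (f.getD rv 0 + rl), a.insert rv (a.getD rv 0 + (rl - 1)), v, 1) by
            simp [bStep, hv]; omega, ih _ _ _ _ (by omega)]
      rw [PySem.Dict.getD_insert]
      by_cases hc : c = rv
      · simp [hc, List.count_cons, Ne.symm hv, hv]
      · by_cases hcv : c = v <;> simp [hc, hcv, List.count_cons] <;> omega

lemma bfold_adj_getD (t : List Int) (f a : PySem.Dict Int Int) (rv rl c : Int)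
    (hrl : 1 ≤ rl) :
    (bFlush (t.foldl bStep (f, a, rv, rl))).2.getD c 0
      = a.getD c 0 + (if c = rv then rl - 1 else 0) + ((pairsList (rv :: t)).count c : Int) := by
  induction t generalizing f a rv rl with
  | nil =>
    rw [List.foldl_nil, show bFlush (f, a, rv, rl)
        = (f.insert rv (f.getD rv 0 + rl), a.insert rv (a.getD rv 0 + (rl - 1))) by
      simp [bFlush]; omega]
    by_cases hc : c = rv <;> simp [PySem.Dict.getD_insert, hc, pairsList]
  | cons v t ih =>
    rw [List.foldl_cons]
    by_cases hv : v = rv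
    · rw [show bStep (f, a, rv, rl) v = (f, a, rv, rl + 1) by simp [bStep, hv]; omega,
        ih _ _ _ _ (by omega)]
      subst hv
      simp only [pairsList, if_pos rfl, List.cons_append, List.nil_append, List.count_cons]
      by_cases hc : c = v <;> simp [hc, List.count_cons] <;> omega
    · rw [show bStep (f, a, rv, rl) v
          = (f.insert rv (f.getD rv 0 + rl), a.insert rv (a.getD rv 0 + (rl - 1)), v, 1) by
            simp [bStep, hv]; omega, ih _ _ _ _ (by omega)]
      rw [PySem.Dict.getD_insert]
      have hpl : pairsList (rv :: v :: t) = pairsList (v :: t) := by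
        simp [pairsList, Ne.symm hv]
      rw [hpl]
      by_cases hc : c = rv
      · simp [hc, Ne.symm hv, hv]
      · by_cases hcv : c = v <;> simp [hc, hcv] <;> omega

lemma bfold_freq_keys_mem (t : List Int) (f a : PySem.Dict Int Int) (rv rl c : Int)
    (hrl : 1 ≤ rl) :
    c ∈ (bFlush (t.foldl bStep (f, a, rv, rl))).1.keys ↔ c ∈ f.keys ∨ c = rv ∨ c ∈ t := by
  induction t generalizing f a rv rl with
  | nil =>
    rw [List.foldl_nil, show bFlush (f, a, rv, rl)
        = (f.insert rv (f.getD rv 0 + rl), a.insert rv (a.getD rv 0 + (rl - 1))) by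
      simp [bFlush]; omega]
    simp [PySem.Dict.mem_keys_insert]; try tauto
  | cons v t ih =>
    rw [List.foldl_cons]
    by_cases hv : v = rv
    · rw [show bStep (f, a, rv, rl) v = (f, a, rv, rl + 1) by simp [bStep, hv]; omega,
        ih _ _ _ _ (by omega)]
      subst hv; simp; try tauto
    · rw [show bStep (f, a, rv, rl) v
          = (f.insert rv (f.getD rv 0 + rl), a.insert rv (a.getD rv 0 + (rl - 1)), v, 1) by
            simp [bStep, hv]; omega, ih _ _ _ _ (by omega)]
      simp [PySem.Dict.mem_keys_insert]; try tauto

lemma bfold_adj_keys_mem (t : List Int) (f a : PySem.Dict Int Int) (rv rl c : Int)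
    (hrl : 1 ≤ rl) :
    c ∈ (bFlush (t.foldl bStep (f, a, rv, rl))).2.keys ↔ c ∈ a.keys ∨ c = rv ∨ c ∈ t := by
  induction t generalizing f a rv rl with
  | nil =>
    rw [List.foldl_nil, show bFlush (f, a, rv, rl)
        = (f.insert rv (f.getD rv 0 + rl), a.insert rv (a.getD rv 0 + (rl - 1))) by
      simp [bFlush]; omega]
    simp [PySem.Dict.mem_keys_insert]; try tauto
  | cons v t ih =>
    rw [List.foldl_cons]
    by_cases hv : v = rv
    · rw [show bStep (f, a, rv, rl) v = (f, a, rv, rl + 1) by simp [bStep, hv]; omega,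
        ih _ _ _ _ (by omega)]
      subst hv; simp; try tauto
    · rw [show bStep (f, a, rv, rl) v
          = (f.insert rv (f.getD rv 0 + rl), a.insert rv (a.getD rv 0 + (rl - 1)), v, 1) by
            simp [bStep, hv]; omega, ih _ _ _ _ (by omega)]
      simp [PySem.Dict.mem_keys_insert]; try tauto

lemma bfold_freq_keys_nodup (t : List Int) (f a : PySem.Dict Int Int) (rv rl : Int)
    (hrl : 1 ≤ rl) (hf : f.keys.Nodup) :
    (bFlush (t.foldl bStep (f, a, rv, rl))).1.keys.Nodup := by
  induction t generalizing f a rv rl with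
  | nil =>
    rw [List.foldl_nil, show bFlush (f, a, rv, rl)
        = (f.insert rv (f.getD rv 0 + rl), a.insert rv (a.getD rv 0 + (rl - 1))) by
      simp [bFlush]; omega]
    exact PySem.Dict.nodup_keys_insert _ _ _ hf
  | cons v t ih =>
    rw [List.foldl_cons]
    by_cases hv : v = rv
    · rw [show bStep (f, a, rv, rl) v = (f, a, rv, rl + 1) by simp [bStep, hv]; omega]
      exact ih _ _ _ _ (by omega) hf
    · rw [show bStep (f, a, rv, rl) v
          = (f.insert rv (f.getD rv 0 + rl), a.insert rv (a.getD rv 0 + (rl - 1)), v, 1) by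
            simp [bStep, hv]; omega]
      exact ih _ _ _ _ (by omega) (PySem.Dict.nodup_keys_insert _ _ _ hf)

lemma bfold_adj_keys_nodup (t : List Int) (f a : PySem.Dict Int Int) (rv rl : Int)
    (hrl : 1 ≤ rl) (ha : a.keys.Nodup) :
    (bFlush (t.foldl bStep (f, a, rv, rl))).2.keys.Nodup := by
  induction t generalizing f a rv rl with
  | nil =>
    rw [List.foldl_nil, show bFlush (f, a, rv, rl)
        = (f.insert rv (f.getD rv 0 + rl), a.insert rv (a.getD rv 0 + (rl - 1))) by
      simp [bFlush]; omega]
    exact PySem.Dict.nodup_keys_insert _ _ _ ha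
  | cons v t ih =>
    rw [List.foldl_cons]
    by_cases hv : v = rv
    · rw [show bStep (f, a, rv, rl) v = (f, a, rv, rl + 1) by simp [bStep, hv]; omega]
      exact ih _ _ _ _ (by omega) ha
    · rw [show bStep (f, a, rv, rl) v
          = (f.insert rv (f.getD rv 0 + rl), a.insert rv (a.getD rv 0 + (rl - 1)), v, 1) by
            simp [bStep, hv]; omega]
      exact ih _ _ _ _ (by omega) (PySem.Dict.nodup_keys_insert _ _ _ ha)

lemma pairsList_short (l : List Int) (h : l.length ≤ 1) : pairsList l = [] := by
  match l, h with
  | [], _ => rfl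
  | [x], _ => rfl

lemma foldl_pyRange_take {β : Type} (A : List Int) (N : Int) (f : β → Int → β) (b : β)
    (hlen : N ≤ (A.length : Int)) :
    (PySem.List.pyRange 0 N 1).foldl (fun acc i => f acc (PySem.List.pyGetD A i 0)) b
      = (A.take N.toNat).foldl f b := by
  by_cases hN : 0 < N
  · have hcongr : ∀ (acc : β), ∀ i ∈ PySem.List.pyRange 0 N 1,
        f acc (PySem.List.pyGetD A i 0) = f acc (PySem.List.pyGetD (A.take N.toNat) i 0) := by
      intro acc i hi
      obtain ⟨hi0, hiN⟩ := PySem.List.mem_pyRange_one.1 hi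
      have hgt : PySem.List.pyGetD (A.take N.toNat) i 0 = PySem.List.pyGetD A i 0 := by
        rw [PySem.List.pyGetD_of_nonneg _ _ hi0, PySem.List.pyGetD_of_nonneg _ _ hi0]
        have hin : i.toNat < N.toNat := by omega
        have hiA : i.toNat < A.length := by omega
        rw [List.getD_eq_getElem _ _ (by rw [List.length_take]; omega :
            i.toNat < (A.take N.toNat).length), List.getD_eq_getElem _ _ hiA]
        simp only [List.getElem_take]
      rw [hgt]
    rw [PySem.List.foldl_congr_mem _ _ _ _ hcongr]
    have hTlen : N = ((A.take N.toNat).length : Int) := by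
      simp [List.length_take]; omega
    rw [show PySem.List.pyRange 0 N 1
        = PySem.List.pyRange 0 (((A.take N.toNat).length : Int)) 1 from by rw [← hTlen]]
    exact PySem.List.foldl_pyRange_zero_pyGetD' (A.take N.toNat) 0 f b
  · rw [PySem.List.pyRange_one_eq_nil (by omega), show N.toNat = 0 by omega, List.take_zero]
    rfl

lemma loop2_eq (A : List Int) (N : Int) (b : List Int) (hlen : N ≤ (A.length : Int)) :
    (PySem.List.pyRange 0 (N - 1) 1).foldl
      (fun lk i => if PySem.List.pyGetD A i 0 == PySem.List.pyGetD A (i + 1) 0 then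
          PySem.List.pySetD lk (PySem.List.pyGetD A i 0)
            (PySem.List.pyGetD lk (PySem.List.pyGetD A i 0) 0 + 1)
        else lk) b
    = (pairsList (A.take N.toNat)).foldl
      (fun lk v => PySem.List.pySetD lk v (PySem.List.pyGetD lk v 0 + 1)) b := by
  by_cases h2 : 2 ≤ N
  · set l := A.take N.toNat with hl
    have hlL : l.length = N.toNat := by rw [hl, List.length_take]; omega
    have hget : ∀ i : Int, 0 ≤ i → i < N → PySem.List.pyGetD A i 0 = PySem.List.pyGetD l i 0 := by
      intro i hi0 hiN
      rw [PySem.List.pyGetD_of_nonneg _ _ hi0, PySem.List.pyGetD_of_nonneg _ _ hi0]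
      have hin : i.toNat < l.length := by omega
      have hiA : i.toNat < A.length := by omega
      rw [List.getD_eq_getElem _ _ hin, List.getD_eq_getElem _ _ hiA]
      simp only [hl, List.getElem_take]
    have hcongr : ∀ (acc : List Int), ∀ i ∈ PySem.List.pyRange 0 (N - 1) 1,
        (if PySem.List.pyGetD A i 0 == PySem.List.pyGetD A (i + 1) 0 then
            PySem.List.pySetD acc (PySem.List.pyGetD A i 0)
              (PySem.List.pyGetD acc (PySem.List.pyGetD A i 0) 0 + 1)
          else acc)
        = (if PySem.List.pyGetD l i 0 == PySem.List.pyGetD l (i + 1) 0 then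
            PySem.List.pySetD acc (PySem.List.pyGetD l i 0)
              (PySem.List.pyGetD acc (PySem.List.pyGetD l i 0) 0 + 1)
          else acc) := by
      intro acc i hi
      obtain ⟨hi0, hiN⟩ := PySem.List.mem_pyRange_one.1 hi
      rw [hget i hi0 (by omega), hget (i + 1) (by omega) (by omega)]
    rw [PySem.List.foldl_congr_mem _ _ _ _ hcongr]
    have hcast : N - 1 = ((l.length - 1 : Nat) : Int) := by omega
    rw [hcast, PySem.List.pyRange_zero_natCast, List.foldl_map]
    have hbody : ∀ (acc : List Int), ∀ k ∈ List.range (l.length - 1),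
        (if PySem.List.pyGetD l (↑k) 0 == PySem.List.pyGetD l ((↑k : Int) + 1) 0 then
            PySem.List.pySetD acc (PySem.List.pyGetD l (↑k) 0)
              (PySem.List.pyGetD acc (PySem.List.pyGetD l (↑k) 0) 0 + 1)
          else acc)
        = (if l.getD k 0 == l.getD (k + 1) 0 then
            PySem.List.pySetD acc (l.getD k 0)
              (PySem.List.pyGetD acc (l.getD k 0) 0 + 1)
          else acc) := by
      intro acc k _
      rw [PySem.List.pyGetD_natCast,
        show ((k : Int) + 1) = ((k + 1 : Nat) : Int) by push_cast; ring,
        PySem.List.pyGetD_natCast]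
    rw [PySem.List.foldl_congr_mem _ _ _ _ hbody,
      foldl_range_adj_nat l (fun acc x y => if x == y then
        PySem.List.pySetD acc x (PySem.List.pyGetD acc x 0 + 1) else acc) b,
      PySem.List.foldl_if_eq_foldl_filter (fun p => p.1 == p.2)
        (fun acc (p : Int × Int) => PySem.List.pySetD acc p.1 (PySem.List.pyGetD acc p.1 0 + 1)),
      ← zip_filter_eq_pairsList l, List.foldl_map]
  · rw [PySem.List.pyRange_one_eq_nil (by omega),
      pairsList_short (A.take N.toNat) (by rw [List.length_take]; omega)]
    rfl

lemma map_replicate_getD (sz : Nat) (g : Nat → Int) :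
    (List.range ((List.replicate sz (0 : Int)).length)).map
        (fun j => (List.replicate sz (0 : Int)).getD j 0 + g j)
      = (List.range sz).map (fun j => g j) := by
  rw [List.length_replicate]
  apply List.map_congr_left
  intro j hj
  rw [List.getD_eq_getElem _ _ (by simpa using List.mem_range.1 hj), List.getElem_replicate]
  ring

lemma portA_char (N : Int) (A : List Int) (hN1 : N ≠ 1) (hlen : N ≤ (A.length : Int))
    (hex : ∃ x ∈ A, 0 ≤ x) (hnnp : ∀ x ∈ A.take N.toNat, 0 ≤ x) :
    min_reversals_to_like_array N A =
      outcome
        ((List.range ((PySem.List.max? A (fun x => x)).getD 0 + 1).toNat).map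
          (fun (j : Nat) => ((A.take N.toNat).count (j : Int) : Int)))
        ((List.range ((PySem.List.max? A (fun x => x)).getD 0 + 1).toNat).map
          (fun (j : Nat) => ((pairsList (A.take N.toNat)).count (j : Int) : Int)))
        N := by
  have hbN1 : (N == 1) = false := beq_eq_false_iff_ne.2 hN1
  obtain ⟨x0, hx0A, hx00⟩ := hex
  have hAne : A ≠ [] := List.ne_nil_of_mem hx0A
  obtain ⟨Mv, hMv⟩ : ∃ m, PySem.List.max? A (fun x => x) = some m := by
    cases hc : PySem.List.max? A (fun x => x) with
    | none => exact absurd ((PySem.List.max?_eq_none_iff A _).1 hc) hAne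
    | some m => exact ⟨m, rfl⟩
  have hMmax : ∀ y ∈ A, y ≤ Mv := fun y hy => PySem.List.max?_isMax hMv y hy
  have hM0 : 0 ≤ Mv := le_trans hx00 (hMmax x0 hx0A)
  have hb : ∀ v ∈ A.take N.toNat, 0 ≤ v ∧
      v < ((List.replicate ((PySem.List.max? A (fun x => x)).getD 0 + 1).toNat (0 : Int)).length : Int) := by
    intro v hv
    have hvA : v ∈ A := List.mem_of_mem_take hv
    have h1 := hnnp v hv
    have h2 := hMmax v hvA
    rw [hMv, List.length_replicate]
    simp only [Option.getD_some]
    omega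
  have hb2 : ∀ v ∈ pairsList (A.take N.toNat), 0 ≤ v ∧
      v < ((List.replicate ((PySem.List.max? A (fun x => x)).getD 0 + 1).toNat (0 : Int)).length : Int) :=
    fun v hv => hb v (mem_pairsList hv)
  unfold min_reversals_to_like_array outcome
  simp only [hbN1, Bool.false_eq_true, if_false]
  rw [PySem.List.pyRepeat_singleton,
    foldl_pyRange_take A N
      (fun lc v => PySem.List.pySetD lc v (PySem.List.pyGetD lc v 0 + 1)) _ hlen,
    loop2_eq A N _ hlen,
    incFold_eq _ _ hb, incFold_eq _ _ hb2, map_replicate_getD, map_replicate_getD]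

lemma portB_char (N : Int) (A : List Int) (hN1 : N ≠ 1) (hlen : N ≤ (A.length : Int)) :
    ∃ K1 K2 : List Int, K1.Nodup ∧ K2.Nodup ∧
      (∀ c, c ∈ K1 ↔ c ∈ A.take N.toNat) ∧ (∀ c, c ∈ K2 ↔ c ∈ A.take N.toNat) ∧
      min_reversals_to_like_array_alt N A =
        outcome (K1.map (fun v => ((A.take N.toNat).count v : Int)))
                (K2.map (fun v => ((pairsList (A.take N.toNat)).count v : Int))) N := by
  have hbN1 : (N == 1) = false := beq_eq_false_iff_ne.2 hN1
  have hfold : (PySem.List.pyRange 0 N 1).foldl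
      (fun st i => bStep st (PySem.List.pyGetD A i 0))
      (PySem.Dict.empty, PySem.Dict.empty, 0, 0)
      = (A.take N.toNat).foldl bStep (PySem.Dict.empty, PySem.Dict.empty, 0, 0) :=
    foldl_pyRange_take A N bStep _ hlen
  by_cases hemp : A.take N.toNat = []
  · refine ⟨[], [], List.nodup_nil, List.nodup_nil, by simp [hemp], by simp [hemp], ?_⟩
    unfold min_reversals_to_like_array_alt outcome
    simp only [hbN1, Bool.false_eq_true, if_false, hfold, hemp, List.foldl_nil, List.map_nil]
    rw [show bFlush (PySem.Dict.empty, PySem.Dict.empty, (0 : Int), (0 : Int))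
        = (PySem.Dict.empty, PySem.Dict.empty) by simp [bFlush]]
    rfl
  · obtain ⟨h, t, hc⟩ := List.exists_cons_of_ne_nil hemp
    have hstep : bStep (PySem.Dict.empty, PySem.Dict.empty, (0 : Int), (0 : Int)) h
        = (PySem.Dict.empty, PySem.Dict.empty, h, 1) := by simp [bStep]
    set fd := bFlush ((A.take N.toNat).foldl bStep
      (PySem.Dict.empty, PySem.Dict.empty, 0, 0)) with hfd
    have hfd' : fd = bFlush (t.foldl bStep (PySem.Dict.empty, PySem.Dict.empty, h, 1)) := by
      rw [hfd, hc, List.foldl_cons, hstep]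
    have hfreq : ∀ c, fd.1.getD c 0 = ((A.take N.toNat).count c : Int) := by
      intro c
      rw [hfd', bfold_freq_getD _ _ _ _ _ _ (le_refl 1), PySem.Dict.getD_empty, hc,
        List.count_cons]
      by_cases hch : c = h <;> simp [hch] <;> omega
    have hadj : ∀ c, fd.2.getD c 0 = ((pairsList (A.take N.toNat)).count c : Int) := by
      intro c
      rw [hfd', bfold_adj_getD _ _ _ _ _ _ (le_refl 1), PySem.Dict.getD_empty, hc]
      by_cases hch : c = h <;> simp [hch]
    have hmem1 : ∀ c, c ∈ fd.1.keys ↔ c ∈ A.take N.toNat := by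
      intro c
      rw [hfd', bfold_freq_keys_mem _ _ _ _ _ _ (le_refl 1), PySem.Dict.keys_empty, hc]
      simp [List.mem_cons]
    have hmem2 : ∀ c, c ∈ fd.2.keys ↔ c ∈ A.take N.toNat := by
      intro c
      rw [hfd', bfold_adj_keys_mem _ _ _ _ _ _ (le_refl 1), PySem.Dict.keys_empty, hc]
      simp [List.mem_cons]
    have hnd1 : fd.1.keys.Nodup := by
      rw [hfd']
      exact bfold_freq_keys_nodup _ _ _ _ _ (le_refl 1) (by simp [PySem.Dict.keys_empty])
    have hnd2 : fd.2.keys.Nodup := by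
      rw [hfd']
      exact bfold_adj_keys_nodup _ _ _ _ _ (le_refl 1) (by simp [PySem.Dict.keys_empty])
    refine ⟨fd.1.keys, fd.2.keys, hnd1, hnd2, hmem1, hmem2, ?_⟩
    have hv1 : fd.1.values = fd.1.keys.map (fun v => ((A.take N.toNat).count v : Int)) := by
      rw [PySem.Dict.values_eq_map_keys fd.1 hnd1 0]
      exact List.map_congr_left (fun k _ => hfreq k)
    have hv2 : fd.2.values
        = fd.2.keys.map (fun v => ((pairsList (A.take N.toNat)).count v : Int)) := by
      rw [PySem.Dict.values_eq_map_keys fd.2 hnd2 0]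
      exact List.map_congr_left (fun k _ => hadj k)
    unfold min_reversals_to_like_array_alt outcome
    simp only [hbN1, Bool.false_eq_true, if_false, hfold, ← hfd, hv1, hv2]

lemma maxD0_zero (xs : List Int) (h : ∀ x ∈ xs, x = 0) :
    (PySem.List.max? xs (fun x => x)).getD 0 = 0 := by
  cases hc : PySem.List.max? xs (fun x => x) with
  | none => rfl
  | some m => simpa using h m (PySem.List.max?_mem hc)

lemma main_eq (N : Int) (A : List Int)
    (hpre : N = 1 ∨ (N ≤ (A.length : Int) ∧ (∃ x ∈ A, 0 ≤ x) ∧ ∀ x ∈ A.take N.toNat, 0 ≤ x)) :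
    min_reversals_to_like_array N A = min_reversals_to_like_array_alt N A := by
  rcases hpre with hN1 | ⟨hlen, hex, hnnp⟩
  · simp [min_reversals_to_like_array, min_reversals_to_like_array_alt, hN1]
  · by_cases hN1 : N = 1
    · simp [min_reversals_to_like_array, min_reversals_to_like_array_alt, hN1]
    · obtain ⟨K1, K2, hnd1, hnd2, hm1, hm2, hBeq⟩ := portB_char N A hN1 hlen
      rw [portA_char N A hN1 hlen hex hnnp, hBeq]
      set l := A.take N.toNat with hl
      set sz := ((PySem.List.max? A (fun x => x)).getD 0 + 1).toNat with hsz
      obtain ⟨x0, hx0A, hx00⟩ := hex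
      have hAne : A ≠ [] := List.ne_nil_of_mem hx0A
      obtain ⟨Mv, hMv⟩ : ∃ m, PySem.List.max? A (fun x => x) = some m := by
        cases hcm : PySem.List.max? A (fun x => x) with
        | none => exact absurd ((PySem.List.max?_eq_none_iff A _).1 hcm) hAne
        | some m => exact ⟨m, rfl⟩
      have hMmax : ∀ y ∈ A, y ≤ Mv := fun y hy => PySem.List.max?_isMax hMv y hy
      have hM0 : 0 ≤ Mv := le_trans hx00 (hMmax x0 hx0A)
      have hszM : (sz : Int) = Mv + 1 := by rw [hsz, hMv]; simp; omega
      by_cases hN0 : N ≤ 0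
      · -- A iterates over no elements at all; both sides see only zero counts
        have hle : l = [] := by
          rw [hl, show N.toNat = 0 by omega]
          exact List.take_zero
        have hK1 : K1 = [] := List.eq_nil_iff_forall_not_mem.2
          (fun c hc => by rw [hle] at hm1; exact (List.not_mem_nil) ((hm1 c).1 hc))
        have hK2 : K2 = [] := List.eq_nil_iff_forall_not_mem.2
          (fun c hc => by rw [hle] at hm2; exact (List.not_mem_nil) ((hm2 c).1 hc))
        apply outcome_congr
        · rw [hK1, maxD0_zero _ (by
            intro x hx
            obtain ⟨j, hj, rfl⟩ := List.mem_map.1 hx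
            simp [hle])]
          rfl
        · rw [hK2, maxD0_zero _ (by
            intro x hx
            obtain ⟨j, hj, rfl⟩ := List.mem_map.1 hx
            simp [hle, pairsList])]
          rfl
        · rw [hK2]
          simp [hle, pairsList]
      · have h2 : 2 ≤ N := by omega
        have hbnd : ∀ v ∈ l, 0 ≤ v ∧ v < (sz : Int) := by
          intro v hv
          have hvA : v ∈ A := List.mem_of_mem_take hv
          have := hnnp v hv
          have := hMmax v hvA
          omega
        have hlne : l ≠ [] := by
          intro hcl
          have : l.length = 0 := by rw [hcl]; rfl
          rw [hl, List.length_take] at this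
          omega
        obtain ⟨h0, hh0⟩ := List.exists_mem_of_ne_nil l hlne
        have hsz1 : 0 < sz := by omega
        have hrangene : (List.range sz) ≠ [] := by
          simp [List.range_eq_nil]; omega
        have hmemS : ∀ v ∈ l, v ∈ (List.range sz).map (fun (j : Nat) => (j : Int)) := by
          intro v hv
          obtain ⟨hv1, hv2⟩ := hbnd v hv
          exact List.mem_map.2 ⟨v.toNat, List.mem_range.2 (by omega), by omega⟩
        apply outcome_congr
        · -- max of frequency lists
          apply max_getD_eq
          · intro hcc; exact hrangene (List.map_eq_nil_iff.1 hcc)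
          · intro hcc
            exact absurd ((hm1 h0).2 hh0) (by simp [List.map_eq_nil_iff.1 hcc])
          · intro x hx
            obtain ⟨j, hj, rfl⟩ := List.mem_map.1 hx
            by_cases hjl : ((j : Nat) : Int) ∈ l
            · exact ⟨(l.count ((j : Nat) : Int) : Int),
                List.mem_map.2 ⟨((j : Nat) : Int), (hm1 _).2 hjl, rfl⟩, le_refl _⟩
            · refine ⟨(l.count h0 : Int), List.mem_map.2 ⟨h0, (hm1 _).2 hh0, rfl⟩, ?_⟩
              rw [List.count_eq_zero.2 hjl]
              exact Int.natCast_nonneg _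
          · intro y hy
            obtain ⟨v, hv, rfl⟩ := List.mem_map.1 hy
            have hvl : v ∈ l := (hm1 v).1 hv
            obtain ⟨hv0, hvsz⟩ := hbnd v hvl
            refine ⟨(l.count ((v.toNat : Nat) : Int) : Int),
              List.mem_map.2 ⟨v.toNat, List.mem_range.2 (by omega), rfl⟩, ?_⟩
            rw [show ((v.toNat : Nat) : Int) = v by omega]
        · -- max of adjacency lists
          apply max_getD_eq
          · intro hcc; exact hrangene (List.map_eq_nil_iff.1 hcc)
          · intro hcc
            exact absurd ((hm2 h0).2 hh0) (by simp [List.map_eq_nil_iff.1 hcc])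
          · intro x hx
            obtain ⟨j, hj, rfl⟩ := List.mem_map.1 hx
            by_cases hjl : ((j : Nat) : Int) ∈ pairsList l
            · exact ⟨((pairsList l).count ((j : Nat) : Int) : Int),
                List.mem_map.2 ⟨((j : Nat) : Int), (hm2 _).2 (mem_pairsList hjl), rfl⟩, le_refl _⟩
            · refine ⟨((pairsList l).count h0 : Int),
                List.mem_map.2 ⟨h0, (hm2 _).2 hh0, rfl⟩, ?_⟩
              rw [List.count_eq_zero.2 hjl]
              exact Int.natCast_nonneg _
          · intro y hy
            obtain ⟨v, hv, rfl⟩ := List.mem_map.1 hy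
            have hvl : v ∈ l := (hm2 v).1 hv
            obtain ⟨hv0, hvsz⟩ := hbnd v hvl
            refine ⟨((pairsList l).count ((v.toNat : Nat) : Int) : Int),
              List.mem_map.2 ⟨v.toNat, List.mem_range.2 (by omega), rfl⟩, ?_⟩
            rw [show ((v.toNat : Nat) : Int) = v by omega]
        · -- sums of adjacency lists
          have e1 : ((List.range sz).map
                (fun (j : Nat) => ((pairsList l).count (j : Int) : Int))).sum
              = ((pairsList l).length : Int) := by
            rw [show (List.range sz).map (fun (j : Nat) => ((pairsList l).count (j : Int) : Int))
                = ((List.range sz).map (fun (j : Nat) => (j : Int))).map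
                    (fun v => ((pairsList l).count v : Int)) by rw [List.map_map]; rfl]
            exact sum_count_int _ _
              (List.Nodup.map (f := fun j : Nat => (j : Int)) (fun a b hab => by simpa using hab)
                List.nodup_range)
              (fun x hx => hmemS x (mem_pairsList hx))
          have e2 : (K2.map (fun v => ((pairsList l).count v : Int))).sum
              = ((pairsList l).length : Int) :=
            sum_count_int _ _ hnd2 (fun x hx => (hm2 x).2 (mem_pairsList hx))
          rw [e1, e2]

-- ===== VERDICT (by name: the statement is the Claim_ definition above) =====
theorem min_reversals_to_like_array_spec : Claim_equal_min_reversals_to_like_array := by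
  intro N A hdom hpre
  unfold Spec_min_reversals_to_like_array
  exact main_eq N A hpre
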